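-- pv_equiv track=rewrite | github.com/ChaBoxxHF/Licence-Informatique | Licence_1/tp I23/tp corrections.py | phoqueit
-- ===== SOURCE A (Python) =====
-- def phoqueit(n):
--     A = ['.']
--     B = ['..','-']
--     if n == 0:
--         L = [0]
--     elif n == 1:
--         L = A
--     elif n == 2:
--         L = B
--     else:
--         for k in range(3,n+1):
--             L = ['.' + x for x in B] + ['-' + x for x in A]
--             A = B
--             B = L
--     return L
-- ===== SOURCE B (Python) =====
-- def phoqueit(n):
--     if n == 1:
--         return ['.']
--     if n == 2:
--         return ['..', '-']
--     return ['.' + x for x in phoqueit(n - 1)] + ['-' + x for x in phoqueit(n - 2)]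
-- ===== Notes on version B (the rewrite author's own statement) =====
-- stated objective: alternative
-- what changed: Replaces A's iterative rolling-window DP loop over range(3,n+1) with direct naive recursion on the same Fibonacci recurrence (f(n)=map('.'+)f(n-1) ++ map('-'+)f(n-2)), identical concatenation order.
-- outside the precondition, e.g. on phoqueit(0): A returns [0], B raises RecursionError; on phoqueit(-1): A raises UnboundLocalError, B raises RecursionError
import Mathlib
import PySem

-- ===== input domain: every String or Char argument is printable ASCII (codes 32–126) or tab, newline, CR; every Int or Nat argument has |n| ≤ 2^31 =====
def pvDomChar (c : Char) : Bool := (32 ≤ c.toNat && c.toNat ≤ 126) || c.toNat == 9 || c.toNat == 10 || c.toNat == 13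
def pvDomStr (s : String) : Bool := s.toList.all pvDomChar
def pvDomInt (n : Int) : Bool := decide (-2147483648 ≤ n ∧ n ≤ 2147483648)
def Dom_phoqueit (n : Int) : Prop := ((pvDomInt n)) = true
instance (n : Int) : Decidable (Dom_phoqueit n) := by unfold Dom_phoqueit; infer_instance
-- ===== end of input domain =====

-- B replaces A's iterative rolling-window loop by direct recursion on the same
-- Fibonacci recurrence (alternative decomposition, same output order).

-- ===== PORT A =====
-- the loop body: L = ['.'+x for x in B] + ['-'+x for x in A]; A = B; B = L
def phoqueitStep (s : List String × List String × List String) (_ : Int) :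
    List String × List String × List String :=
  let L := s.2.1.map (fun x => "." ++ x) ++ s.1.map (fun x => "-" ++ x)
  (s.2.1, L, L)

def phoqueit (n : Int) : List String :=
  let A := ["."]
  let B := ["..", "-"]
  if n = 0 then []          -- Python returns [0] (an int in the list, not a string); excluded by Pre_
  else if n = 1 then A
  else if n = 2 then B
  else                      -- Python's L is unbound before the loop; under Pre_ (n ≥ 1) this branch means n ≥ 3 and the loop runs
    ((PySem.List.pyRange 3 (n + 1) 1).foldl phoqueitStep (A, B, [])).2.2

-- ===== PORT B =====
-- Source B recursion, on Nat (Source B recurses forever for n ≤ 0, a region outside Pre_; the 0 case here is unreachable under Pre_)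
def phoqueitRec : Nat → List String
  | 0 => []
  | 1 => ["."]
  | 2 => ["..", "-"]
  | (m + 3) =>
      (phoqueitRec (m + 2)).map (fun x => "." ++ x) ++
      (phoqueitRec (m + 1)).map (fun x => "-" ++ x)

def phoqueit_alt (n : Int) : List String := phoqueitRec n.toNat

-- ===== PRECONDITION & SPEC =====
-- Pre_ excludes n = 0, where A returns [0] (an int inside the list, not a value of the
-- declared List String type), and n < 0, where A raises UnboundLocalError (L never assigned).
def Pre_phoqueit (n : Int) : Prop := 1 ≤ n
instance (n : Int) : Decidable (Pre_phoqueit n) := by unfold Pre_phoqueit; infer_instance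
def pvWitness_phoqueit : Int := 4

def Spec_phoqueit (n : Int) (out : List String) : Prop := out = phoqueit_alt n
instance (n : Int) (out : List String) : Decidable (Spec_phoqueit n out) := by unfold Spec_phoqueit; infer_instance

-- ===== CLAIM (what is proved, stated in full; the proofs are below) =====
def Claim_equal_phoqueit : Prop := ∀ (n : Int), Dom_phoqueit n → Pre_phoqueit n → Spec_phoqueit n (phoqueit n)

-- ===== LEMMAS AND PROOFS =====

-- loop invariant: after processing range(3, m+3+1) the state is (f(m+2), f(m+3), f(m+3))
theorem phoqueit_loop (m : Nat) :
    (PySem.List.pyRange 3 ((m : Int) + 3 + 1) 1).foldl phoqueitStep (["."], ["..", "-"], []) =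
      (phoqueitRec (m + 2), phoqueitRec (m + 3), phoqueitRec (m + 3)) := by
  induction m with
  | zero => decide
  | succ k ih =>
      have h : (PySem.List.pyRange 3 ((↑(k + 1) : Int) + 3 + 1) 1) =
          (PySem.List.pyRange 3 ((k : Int) + 3 + 1) 1) ++ [(k : Int) + 3 + 1] := by
        have h2 := PySem.List.pyRange_one_succ_right (a := 3) (b := (k : Int) + 3 + 1) (by omega)
        rw [show ((↑(k + 1) : Int)) + 3 + 1 = ((k : Int) + 3 + 1) + 1 by push_cast; ring, h2]
      rw [h, List.foldl_append, ih]
      rw [show k + 1 + 3 = (k + 3) + 1 by omega, show k + 1 + 2 = k + 3 by omega,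
        show phoqueitRec ((k + 3) + 1) = (phoqueitRec (k + 3)).map (fun x => "." ++ x) ++
          (phoqueitRec (k + 2)).map (fun x => "-" ++ x) from by
            rw [show k + 3 + 1 = (k + 1) + 3 by omega]; rfl]
      rfl

-- ===== VERDICT (by name: the statement is the Claim_ definition above) =====
theorem phoqueit_spec : Claim_equal_phoqueit := by
  intro n _ hpre
  have hp : 1 ≤ n := hpre
  unfold Spec_phoqueit phoqueit phoqueit_alt
  have h1 : ¬ (n = 0) := by omega
  by_cases h2 : n = 1
  · subst h2; simp [phoqueitRec]
  by_cases h3 : n = 2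
  · subst h3; simp [phoqueitRec]
  · -- n ≥ 3
    have hn3 : 3 ≤ n := by omega
    obtain ⟨m, hm⟩ : ∃ m : Nat, n = (m : Int) + 3 := ⟨(n - 3).toNat, by omega⟩
    simp only [h1, h2, h3, if_false]
    rw [hm, phoqueit_loop m]
    have : ((m : Int) + 3).toNat = m + 3 := by omega
    rw [this]
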